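-- pv_equiv track=rewrite | github.com/mehiskasonen/iti0102-2022 | EXAM/exam7/exam.py | add_or_subtract
-- ===== SOURCE A (Python) =====
-- def add_or_subtract(numbers):
--     """
--     Add or subtract.
--
--     Return the sum of all numbers in a list.
--
--     The sum is calculated according to following rules:
--         -always start by adding all the numbers together.
--         -if you find a 0, start subtracting all following numbers until you find another 0, then start adding again.
--         -there might be more than two 0 in a list - change +/- with every 0 you find.
--
--     For example:
--         [1, 2, 0, 3, 0, 4] -> 1 + 2 - 3 + 4 = 4
--         [0, 2, 1, 0, 1, 0, 2] -> -2 - 1 + 1 - 2 = -4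
--         [1, 2] -> 1 + 2 = 3
--         [4, 0, 2, 3] = 4 - 2 - 3 = -1
--
--     #2
--
--     :param numbers: the list of number given.
--     :return: the sum of all numbers.
--     """
--     change = 1
--     result_sum = 0
--     for nr in numbers:
--         if nr == 0:
--             change = change * -1
--         if change > 0:
--             result_sum += nr
--         if change < 0:
--             result_sum -= nr
--     return result_sum
-- ===== SOURCE B (Python) =====
-- def add_or_subtract(numbers):
--     # Recursive decomposition: sum the segment before the first zero,
--     # then subtract the (recursively computed) toggled sum of the rest.
--     if 0 in numbers:
--         i = numbers.index(0)
--         return sum(numbers[:i]) - add_or_subtract(numbers[i + 1:])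
--     return sum(numbers)
-- ===== Notes on version B (the rewrite author's own statement) =====
-- stated objective: alternative
-- what changed: Replaced the single stateful loop carrying a sign flag with a recursive segment decomposition: sum the prefix before the first zero and subtract the recursively toggled sum of the remainder (negation distributes over the toggling).
import Mathlib
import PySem

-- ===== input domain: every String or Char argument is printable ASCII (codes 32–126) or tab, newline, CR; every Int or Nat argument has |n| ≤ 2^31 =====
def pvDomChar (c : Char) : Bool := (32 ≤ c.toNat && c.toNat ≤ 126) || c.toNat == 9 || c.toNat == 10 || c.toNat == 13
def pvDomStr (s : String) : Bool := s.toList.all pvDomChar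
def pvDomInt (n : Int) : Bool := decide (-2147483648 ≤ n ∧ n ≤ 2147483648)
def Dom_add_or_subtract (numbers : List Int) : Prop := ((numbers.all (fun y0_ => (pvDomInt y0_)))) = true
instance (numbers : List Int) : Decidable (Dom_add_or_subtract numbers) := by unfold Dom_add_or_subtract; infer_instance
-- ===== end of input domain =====

-- B replaces A's stateful sign-toggling loop with a recursive segment decomposition (alternative, same cost).

-- ===== PORT A =====
-- A's loop body on the state (change, result_sum): flip `change` at each 0, then add or subtract nr.
def stepA (st : Int × Int) (nr : Int) : Int × Int :=
  let change := if nr = 0 then st.1 * (-1) else st.1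
  let s1 := if change > 0 then st.2 + nr else st.2
  let s2 := if change < 0 then s1 - nr else s1
  (change, s2)

def add_or_subtract (numbers : List Int) : Int :=
  (numbers.foldl stepA (1, 0)).2

-- ===== PORT B =====
-- B: if 0 in numbers, split at the first zero; sum the prefix and subtract the recursive result of the tail.
def add_or_subtract_alt (numbers : List Int) : Int :=
  if h : (0 : Int) ∈ numbers then
    let i := numbers.idxOf 0
    (numbers.take i).sum - add_or_subtract_alt (numbers.drop (i + 1))
  else
    numbers.sum
termination_by numbers.length
decreasing_by
  have hi : numbers.idxOf 0 < numbers.length := List.idxOf_lt_length_of_mem h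
  simp [List.length_drop]; omega

-- ===== PRECONDITION & SPEC =====
def Spec_add_or_subtract (numbers : List Int) (out : Int) : Prop := out = add_or_subtract_alt numbers
instance (numbers : List Int) (out : Int) : Decidable (Spec_add_or_subtract numbers out) := by unfold Spec_add_or_subtract; infer_instance

-- ===== CLAIM (what is proved, stated in full; the proofs are below) =====
def Claim_equal_add_or_subtract : Prop := ∀ (numbers : List Int), Dom_add_or_subtract numbers → Spec_add_or_subtract numbers (add_or_subtract numbers)

-- ===== LEMMAS AND PROOFS =====

-- intermediate spec: gsum c xs = signed sum of xs with current sign c, toggled at each zero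
def gsum (c : Int) : List Int → Int
  | [] => 0
  | x :: xs => if x = 0 then gsum (-c) xs else c * x + gsum c xs

lemma gsum_neg (xs : List Int) : ∀ c, gsum (-c) xs = - gsum c xs := by
  induction xs with
  | nil => intro c; simp [gsum]
  | cons x xs ih =>
    intro c
    by_cases hx : x = 0
    · simp [gsum, hx, ih]
    · simp [gsum, hx, ih c]; ring

lemma stepA_one_zero (s x : Int) (hx : x = 0) : stepA (1, s) x = (-1, s) := by
  simp [stepA, hx]

lemma stepA_neg_zero (s x : Int) (hx : x = 0) : stepA (-1, s) x = (1, s) := by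
  simp [stepA, hx]

lemma stepA_one_ne (s x : Int) (hx : x ≠ 0) : stepA (1, s) x = (1, s + x) := by
  simp [stepA, hx]

lemma stepA_neg_ne (s x : Int) (hx : x ≠ 0) : stepA (-1, s) x = (-1, s - x) := by
  simp [stepA, hx]

lemma foldl_A (xs : List Int) : ∀ (c s : Int), c = 1 ∨ c = -1 →
    (xs.foldl stepA (c, s)).2 = s + gsum c xs := by
  induction xs with
  | nil => intro c s _; simp [gsum]
  | cons x xs ih =>
    intro c s hc
    rcases hc with h | h <;> subst h
    · by_cases hx : x = 0
      · rw [List.foldl_cons, stepA_one_zero s x hx, ih (-1) s (Or.inr rfl)]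
        simp [gsum, hx, gsum_neg]
      · rw [List.foldl_cons, stepA_one_ne s x hx, ih 1 (s + x) (Or.inl rfl)]
        simp [gsum, hx]; ring
    · by_cases hx : x = 0
      · rw [List.foldl_cons, stepA_neg_zero s x hx, ih 1 s (Or.inl rfl)]
        simp [gsum, hx]
      · rw [List.foldl_cons, stepA_neg_ne s x hx, ih (-1) (s - x) (Or.inr rfl)]
        simp [gsum, hx]; ring

lemma gsum_one_no_zero (xs : List Int) (h : (0 : Int) ∉ xs) : gsum 1 xs = xs.sum := by
  induction xs with
  | nil => simp [gsum]
  | cons x xs ih =>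
    simp at h
    have hx : x ≠ 0 := fun e => h.1 e.symm
    simp [gsum, hx, ih h.2]

lemma gsum_append_no_zero (ys zs : List Int) (h : (0 : Int) ∉ ys) :
    gsum 1 (ys ++ zs) = ys.sum + gsum 1 zs := by
  induction ys with
  | nil => simp
  | cons y ys ih =>
    simp at h
    have hy : y ≠ 0 := fun e => h.1 e.symm
    simp [gsum, hy, ih h.2]; ring

lemma alt_eq_gsum (xs : List Int) : add_or_subtract_alt xs = gsum 1 xs := by
  induction xs using add_or_subtract_alt.induct with
  | case1 xs h i ih =>
    have hi : xs.idxOf 0 < xs.length := List.idxOf_lt_length_of_mem h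
    have hget : xs[xs.idxOf 0]'hi = 0 := by
      have h0 := List.getElem?_idxOf h
      rw [List.getElem?_eq_getElem hi] at h0
      exact Option.some.inj h0
    have hsplit : xs = xs.take (xs.idxOf 0) ++ 0 :: xs.drop (xs.idxOf 0 + 1) := by
      conv_lhs => rw [← List.take_append_drop (xs.idxOf 0) xs]
      congr 1
      rw [List.drop_eq_getElem_cons hi, hget]
    have hno : (0 : Int) ∉ xs.take (xs.idxOf 0) := by
      intro hmem
      have := (List.mem_take_iff_idxOf_lt (List.mem_of_mem_take hmem)).mp hmem
      omega
    rw [add_or_subtract_alt, dif_pos h]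
    show (xs.take (xs.idxOf 0)).sum - add_or_subtract_alt (xs.drop (xs.idxOf 0 + 1)) = _
    conv_rhs => rw [hsplit]
    rw [gsum_append_no_zero _ _ hno]
    have hz : gsum 1 (0 :: xs.drop (xs.idxOf 0 + 1)) = - gsum 1 (xs.drop (xs.idxOf 0 + 1)) := by
      simp [gsum, gsum_neg]
    rw [hz, ih]
    ring
  | case2 xs h =>
    rw [add_or_subtract_alt, dif_neg h]
    exact (gsum_one_no_zero xs h).symm

-- ===== VERDICT (by name: the statement is the Claim_ definition above) =====
theorem add_or_subtract_spec : Claim_equal_add_or_subtract := by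
  intro numbers _
  unfold Spec_add_or_subtract add_or_subtract
  rw [foldl_A numbers 1 0 (Or.inl rfl), alt_eq_gsum]
  simp
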